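-- pv_equiv track=rewrite | github.com/mkumar-avit/zoom-slack-webhook | zoom-slack webhook connector.py | get_user_scim2_group
-- ===== SOURCE A (Python) =====
-- def get_user_scim2_group(scim2data,index = 1):
--     group = 'No Zoom Group'
--     cnt = 0
--     if 'groups' in scim2data:
--         if scim2data['groups'] == []:
--                 group = "No Zoom Group"
--         else:
--             for gItem in scim2data['groups']:
--                 group = f"{gItem['display']}"
--                 cnt += 1
--                 if cnt >= index:
--                     break
--     return group
-- ===== SOURCE B (Python) =====
-- def get_user_scim2_group(scim2data, index=1):
--     groups = scim2data.get('groups')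
--     if not groups:
--         return 'No Zoom Group'
--     i = min(max(index, 1), len(groups)) - 1
--     return f"{groups[i]['display']}"
-- ===== Notes on version B (the rewrite author's own statement) =====
-- stated objective: simpler
-- what changed: Replaces the element-by-element counting loop with direct closed-form indexing: the clamped position min(max(index,1),len)-1 is computed arithmetically and the display of that single group is returned.
import Mathlib
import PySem

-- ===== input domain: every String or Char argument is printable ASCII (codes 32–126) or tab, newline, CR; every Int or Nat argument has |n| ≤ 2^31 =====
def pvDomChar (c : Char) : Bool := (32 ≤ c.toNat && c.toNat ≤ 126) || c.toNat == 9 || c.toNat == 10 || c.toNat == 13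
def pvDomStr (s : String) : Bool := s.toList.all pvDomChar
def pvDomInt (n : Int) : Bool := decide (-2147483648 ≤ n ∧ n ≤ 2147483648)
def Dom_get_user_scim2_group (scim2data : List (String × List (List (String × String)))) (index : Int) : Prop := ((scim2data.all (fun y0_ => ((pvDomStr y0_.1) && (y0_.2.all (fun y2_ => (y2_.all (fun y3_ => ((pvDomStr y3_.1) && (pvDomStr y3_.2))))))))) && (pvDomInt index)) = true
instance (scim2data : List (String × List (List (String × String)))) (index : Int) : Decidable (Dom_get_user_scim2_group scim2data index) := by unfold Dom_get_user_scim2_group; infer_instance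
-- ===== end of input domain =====

-- B replaces A's counting scan with closed-form clamped indexing (objective: simpler).

-- dict lookup on an association list: first pair whose key matches (shared by both ports)
def pvLookup {α : Type} (d : List (String × α)) (k : String) : Option α :=
  (d.find? (fun p => p.1 = k)).map (·.2)

-- ===== PORT A =====
-- the for-loop over scim2data['groups'] with the running cnt and break
def pvLoopA : List (List (String × String)) → Int → Int → String → String
  | [], _, _, group => group
  | g :: rest, cnt, index, _ =>
    let group := (pvLookup g "display").getD ""   -- gItem['display']; KeyError excluded by Pre_
    let cnt := cnt + 1
    if cnt ≥ index then group else pvLoopA rest cnt index group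

def get_user_scim2_group (scim2data : List (String × List (List (String × String)))) (index : Int) : String :=
  match pvLookup scim2data "groups" with
  | none => "No Zoom Group"
  | some gs => if gs = [] then "No Zoom Group" else pvLoopA gs 0 index "No Zoom Group"

-- ===== PORT B =====
def get_user_scim2_group_alt (scim2data : List (String × List (List (String × String)))) (index : Int) : String :=
  match pvLookup scim2data "groups" with
  | none => "No Zoom Group"
  | some gs =>
    if gs = [] then "No Zoom Group"
    else
      let i := min (max index 1) (gs.length : Int) - 1
      (pvLookup (PySem.List.pyGetD gs i []) "display").getD ""   -- groups[i]['display']; i is always in range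

-- ===== PRECONDITION & SPEC =====
-- Pre_ excludes exactly the inputs where Python A raises KeyError: some group among the
-- first min(max(index,1),len) iterated ones has no 'display' key.
def Pre_get_user_scim2_group (scim2data : List (String × List (List (String × String)))) (index : Int) : Prop :=
  ∀ g ∈ ((pvLookup scim2data "groups").getD []).take
      (min (max index 1) (((pvLookup scim2data "groups").getD []).length : Int)).toNat,
    (pvLookup g "display").isSome = true
instance (scim2data : List (String × List (List (String × String)))) (index : Int) : Decidable (Pre_get_user_scim2_group scim2data index) := by unfold Pre_get_user_scim2_group; infer_instance

def pvWitness_get_user_scim2_group : (List (String × List (List (String × String)))) × Int :=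
  ([("groups", [[("display", "Dev")], [("display", "Ops")]])], 2)

def Spec_get_user_scim2_group (scim2data : List (String × List (List (String × String)))) (index : Int) (out : String) : Prop := out = get_user_scim2_group_alt scim2data index
instance (scim2data : List (String × List (List (String × String)))) (index : Int) (out : String) : Decidable (Spec_get_user_scim2_group scim2data index out) := by unfold Spec_get_user_scim2_group; infer_instance

-- ===== CLAIM (what is proved, stated in full; the proofs are below) =====
def Claim_equal_get_user_scim2_group : Prop := ∀ (scim2data : List (String × List (List (String × String)))) (index : Int), Dom_get_user_scim2_group scim2data index → Pre_get_user_scim2_group scim2data index → Spec_get_user_scim2_group scim2data index (get_user_scim2_group scim2data index)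

-- ===== LEMMAS AND PROOFS =====

-- A's loop returns the display of the element at the clamped position min(max(index-cnt,1),len)-1.
theorem pvLoopA_eq (gs : List (List (String × String))) :
    ∀ (g : List (String × String)) (cnt index : Int) (grp : String),
      pvLoopA (g :: gs) cnt index grp
        = (pvLookup ((g :: gs).getD
            (min (max (index - cnt) 1) (((g :: gs).length : Int)) - 1).toNat []) "display").getD "" := by
  induction gs with
  | nil =>
    intro g cnt index grp
    have h0 : (min (max (index - cnt) 1) ((([g] : List (List (String × String))).length : Int)) - 1).toNat = 0 := by
      simp
    rw [h0]
    simp [pvLoopA]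
  | cons g2 rest ih =>
    intro g cnt index grp
    by_cases h : cnt + 1 ≥ index
    · have h0 : (min (max (index - cnt) 1) (((g :: g2 :: rest).length : Int)) - 1).toNat = 0 := by
        simp only [List.length_cons]
        push_cast
        omega
      rw [h0]
      simp [pvLoopA, h]
    · have hk : (min (max (index - cnt) 1) (((g :: g2 :: rest).length : Int)) - 1).toNat
          = (min (max (index - (cnt + 1)) 1) (((g2 :: rest).length : Int)) - 1).toNat + 1 := by
        simp only [List.length_cons]
        push_cast
        omega
      rw [hk]
      simp only [pvLoopA, List.getD_cons_succ]
      rw [if_neg (by omega)]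
      exact ih g2 (cnt + 1) index ((pvLookup g "display").getD "")

theorem get_user_scim2_group_spec : Claim_equal_get_user_scim2_group := by
  intro scim2data index _ _
  unfold Spec_get_user_scim2_group get_user_scim2_group get_user_scim2_group_alt
  cases hg : pvLookup scim2data "groups" with
  | none => rfl
  | some gs =>
    cases gs with
    | nil => rfl
    | cons g rest =>
      simp only [if_neg (List.cons_ne_nil g rest)]
      rw [pvLoopA_eq rest g 0 index "No Zoom Group"]
      have hlen : (0:Int) < ((g :: rest).length : Int) := by exact_mod_cast Nat.succ_pos rest.length
      have hi0 : (0:Int) ≤ min (max index 1) ((g :: rest).length : Int) - 1 := by omega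
      have hi1 : min (max index 1) ((g :: rest).length : Int) - 1 < ((g :: rest).length : Int) := by omega
      rw [PySem.List.pyGetD_eq_getElem _ [] hi0 hi1]
      rw [sub_zero]
      rw [List.getD_eq_getElem _ _ (by omega)]
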